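-- pv_equiv track=rewrite | github.com/mixartemev/bruteforce-http-auth | datesgen.py | gen_dates
-- ===== SOURCE A (Python) =====
-- def gen_dates(year_from, year_to):
--     if year_from < 2000:
--         zeros = tuple(f'{x:02}' for x in range(0, year_to - 1999))
--         ninths = tuple(x for x in range(year_from - 1900, 100))
--         years = ninths + zeros
--     else:
--         years = tuple(f'{x:02}' for x in range(year_from - 2000, year_to - 1999))
--     for year in tuple(range(year_from, year_to+1)) + years:
--         for month in range(1, 13):
--             for day in range(1, 32):
--                 if month in (4, 6, 9, 11) and day == 31:
--                     continue
--                 if month == 2: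
--                     if day > 29:
--                         continue
--                     if int(year) % 4 != 0 and day == 29:
--                         continue
--                 yield f'{day:02}{month:02}{year}\n'
-- ===== SOURCE B (Python) =====
-- def gen_dates(year_from, year_to):
--     # year tokens: the 4-digit years, then the same span rendered as 2-digit tokens
--     # (ints for the 19xx block, zero-padded strings for the 20xx block, exactly as A emits them)
--     if year_from < 2000:
--         tail = [y - 1900 for y in range(year_from, 2000)] \
--              + [f'{y - 2000:02}' for y in range(2000, year_to + 1)]
--     else:
--         tail = [f'{y - 2000:02}' for y in range(year_from, year_to + 1)]
--     for year in list(range(year_from, year_to + 1)) + tail: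
--         feb = 29 if int(year) % 4 == 0 else 28
--         month_days = [31, feb, 31, 30, 31, 30, 31, 31, 30, 31, 30, 31]
--         for month, length in zip(range(1, 13), month_days):
--             for day in range(1, length + 1):
--                 yield f'{day:02}{month:02}{year}\n'
-- ===== Notes on version B (the rewrite author's own statement) =====
-- stated objective: simpler
-- what changed: B replaces the triple loop with continue-guards by a per-year month-length table (feb = 29 iff year%4==0) so each month's day range is exact, and builds the 2-digit year tokens by mapping over the actual year ranges (y-1900 ints for 19xx, zero-padded y-2000 strings for 20xx) instead of A's offset-range tuple concatenation.
import Mathlib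
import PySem

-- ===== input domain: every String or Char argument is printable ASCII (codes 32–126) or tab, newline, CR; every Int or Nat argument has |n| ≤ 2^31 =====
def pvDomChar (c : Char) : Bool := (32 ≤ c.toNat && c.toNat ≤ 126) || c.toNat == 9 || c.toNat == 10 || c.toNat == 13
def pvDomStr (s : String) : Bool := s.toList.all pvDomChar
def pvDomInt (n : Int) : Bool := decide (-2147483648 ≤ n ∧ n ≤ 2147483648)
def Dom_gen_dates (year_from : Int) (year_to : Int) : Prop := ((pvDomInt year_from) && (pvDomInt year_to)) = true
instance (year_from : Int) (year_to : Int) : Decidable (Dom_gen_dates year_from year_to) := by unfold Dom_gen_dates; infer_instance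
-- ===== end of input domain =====

-- B replaces A's continue-guarded 1..31 day loop by a per-year month-length table and builds the
-- 2-digit year tokens by mapping over the actual year ranges; same output (the generator's yielded
-- sequence, as a list), objective: simpler.
-- A year token is represented as a (display string, int value) pair: an int token for the 19xx
-- block, a zero-padded string token for the 20xx block, exactly as the Python carries them.

-- f'{x:02}' = str(x).zfill(2)
def pvPad2 (x : Int) : String := PySem.Str.zfill (PySem.Int.toStr x) 2

-- ===== PORT A =====
def gen_dates (year_from : Int) (year_to : Int) : List String :=
  -- zeros / ninths / years from A, inlined ('years' is used once)
  ((PySem.List.pyRange year_from (year_to + 1) 1).map (fun y => (PySem.Int.toStr y, y)) ++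
    (if year_from < 2000 then
      (PySem.List.pyRange (year_from - 1900) 100 1).map (fun x => (PySem.Int.toStr x, x)) ++
        (PySem.List.pyRange 0 (year_to - 1999) 1).map (fun x => (pvPad2 x, x))
    else
      (PySem.List.pyRange (year_from - 2000) (year_to - 1999) 1).map (fun x => (pvPad2 x, x)))).flatMap
    (fun year =>
      (PySem.List.pyRange 1 13 1).flatMap (fun month =>
        (PySem.List.pyRange 1 32 1).filterMap (fun day =>
          if (month = 4 ∨ month = 6 ∨ month = 9 ∨ month = 11) ∧ day = 31 then none
          else if month = 2 ∧ day > 29 then none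
          else if month = 2 ∧ PySem.Int.mod year.2 4 ≠ 0 ∧ day = 29 then none
          else some (pvPad2 day ++ pvPad2 month ++ year.1 ++ "\n"))))

-- ===== PORT B =====
def gen_dates_alt (year_from : Int) (year_to : Int) : List String :=
  -- 'tail' and 'month_days' (with feb = 29 iff year % 4 == 0) from Source B, inlined
  ((PySem.List.pyRange year_from (year_to + 1) 1).map (fun y => (PySem.Int.toStr y, y)) ++
    (if year_from < 2000 then
      (PySem.List.pyRange year_from 2000 1).map (fun y => (PySem.Int.toStr (y - 1900), y - 1900)) ++
        (PySem.List.pyRange 2000 (year_to + 1) 1).map (fun y => (pvPad2 (y - 2000), y - 2000))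
    else
      (PySem.List.pyRange year_from (year_to + 1) 1).map (fun y => (pvPad2 (y - 2000), y - 2000)))).flatMap
    (fun year =>
      ((PySem.List.pyRange 1 13 1).zip
          [31, if PySem.Int.mod year.2 4 = 0 then 29 else 28, 31, 30, 31, 30, 31, 31, 30, 31, 30, 31]).flatMap
        (fun ml =>
          (PySem.List.pyRange 1 (ml.2 + 1) 1).map (fun day =>
            pvPad2 day ++ pvPad2 ml.1 ++ year.1 ++ "\n")))

-- ===== PRECONDITION & SPEC =====
def Spec_gen_dates (year_from : Int) (year_to : Int) (out : List String) : Prop := out = gen_dates_alt year_from year_to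
instance (year_from : Int) (year_to : Int) (out : List String) : Decidable (Spec_gen_dates year_from year_to out) := by unfold Spec_gen_dates; infer_instance

-- ===== CLAIM (what is proved, stated in full; the proofs are below) =====
def Claim_equal_gen_dates : Prop := ∀ (year_from : Int) (year_to : Int), Dom_gen_dates year_from year_to → Spec_gen_dates year_from year_to (gen_dates year_from year_to)

-- ===== LEMMAS AND PROOFS =====

-- mapping over equal-length ranges with pointwise-equal functions
lemma map_pyRange_eq {α : Type} (a b a' b' : Int) (f g : Int → α)
    (hlen : b - a = b' - a') (h : ∀ k : ℕ, f (a + (k:Int)) = g (a' + (k:Int))) :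
    (PySem.List.pyRange a b 1).map f = (PySem.List.pyRange a' b' 1).map g := by
  rw [PySem.List.pyRange_one, PySem.List.pyRange_one, List.map_map, List.map_map, hlen]
  congr 1
  funext k
  simpa using h k

-- the two inner month/day loops emit the same strings for any token (s, v)
set_option maxRecDepth 20000 in
lemma inner_eq (s : String) (v : Int) :
    (PySem.List.pyRange 1 13 1).flatMap (fun month =>
        (PySem.List.pyRange 1 32 1).filterMap (fun day =>
          if (month = 4 ∨ month = 6 ∨ month = 9 ∨ month = 11) ∧ day = 31 then none
          else if month = 2 ∧ day > 29 then none
          else if month = 2 ∧ PySem.Int.mod v 4 ≠ 0 ∧ day = 29 then none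
          else some (pvPad2 day ++ pvPad2 month ++ s ++ "\n"))) =
      ((PySem.List.pyRange 1 13 1).zip
          [31, if PySem.Int.mod v 4 = 0 then 29 else 28, 31, 30, 31, 30, 31, 31, 30, 31, 30, 31]).flatMap
        (fun ml =>
          (PySem.List.pyRange 1 (ml.2 + 1) 1).map (fun day =>
            pvPad2 day ++ pvPad2 ml.1 ++ s ++ "\n")) := by
  by_cases h : (4:Int) ∣ v <;>
    simp [h, PySem.List.pyRange_one, List.range_succ]

-- the two year-token lists are equal
lemma tokens_eq (year_from year_to : Int) :
    ((PySem.List.pyRange year_from (year_to + 1) 1).map (fun y => (PySem.Int.toStr y, y)) ++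
      (if year_from < 2000 then
        (PySem.List.pyRange (year_from - 1900) 100 1).map (fun x => (PySem.Int.toStr x, x)) ++
          (PySem.List.pyRange 0 (year_to - 1999) 1).map (fun x => (pvPad2 x, x))
      else
        (PySem.List.pyRange (year_from - 2000) (year_to - 1999) 1).map (fun x => (pvPad2 x, x))) :
      List (String × Int)) =
    ((PySem.List.pyRange year_from (year_to + 1) 1).map (fun y => (PySem.Int.toStr y, y)) ++
      (if year_from < 2000 then
        (PySem.List.pyRange year_from 2000 1).map (fun y => (PySem.Int.toStr (y - 1900), y - 1900)) ++
          (PySem.List.pyRange 2000 (year_to + 1) 1).map (fun y => (pvPad2 (y - 2000), y - 2000))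
      else
        (PySem.List.pyRange year_from (year_to + 1) 1).map (fun y => (pvPad2 (y - 2000), y - 2000)))) := by
  by_cases hc : year_from < 2000
  · rw [if_pos hc, if_pos hc,
      map_pyRange_eq (year_from - 1900) 100 year_from 2000
        (fun x => ((PySem.Int.toStr x, x) : String × Int))
        (fun y => ((PySem.Int.toStr (y - 1900), y - 1900) : String × Int)) (by ring)
        (fun k => by have h : year_from - 1900 + (k:Int) = year_from + (k:Int) - 1900 := by ring
                     simp [h]),
      map_pyRange_eq 0 (year_to - 1999) 2000 (year_to + 1)
        (fun x => ((pvPad2 x, x) : String × Int))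
        (fun y => ((pvPad2 (y - 2000), y - 2000) : String × Int)) (by ring)
        (fun k => by have h : (0:Int) + (k:Int) = 2000 + (k:Int) - 2000 := by ring
                     simp [← h])]
  · rw [if_neg hc, if_neg hc,
      map_pyRange_eq (year_from - 2000) (year_to - 1999) year_from (year_to + 1)
        (fun x => ((pvPad2 x, x) : String × Int))
        (fun y => ((pvPad2 (y - 2000), y - 2000) : String × Int)) (by ring)
        (fun k => by have h : year_from - 2000 + (k:Int) = year_from + (k:Int) - 2000 := by ring
                     simp [h])]

-- ===== VERDICT (by name: the statement is the Claim_ definition above) =====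
theorem gen_dates_spec : Claim_equal_gen_dates := by
  intro year_from year_to _
  unfold Spec_gen_dates gen_dates gen_dates_alt
  rw [tokens_eq]
  have hf : (fun (year : String × Int) =>
      (PySem.List.pyRange 1 13 1).flatMap (fun month =>
        (PySem.List.pyRange 1 32 1).filterMap (fun day =>
          if (month = 4 ∨ month = 6 ∨ month = 9 ∨ month = 11) ∧ day = 31 then none
          else if month = 2 ∧ day > 29 then none
          else if month = 2 ∧ PySem.Int.mod year.2 4 ≠ 0 ∧ day = 29 then none
          else some (pvPad2 day ++ pvPad2 month ++ year.1 ++ "\n")))) =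
      (fun (year : String × Int) =>
      ((PySem.List.pyRange 1 13 1).zip
          [31, if PySem.Int.mod year.2 4 = 0 then 29 else 28, 31, 30, 31, 30, 31, 31, 30, 31, 30, 31]).flatMap
        (fun ml =>
          (PySem.List.pyRange 1 (ml.2 + 1) 1).map (fun day =>
            pvPad2 day ++ pvPad2 ml.1 ++ year.1 ++ "\n"))) :=
    funext fun t => inner_eq t.1 t.2
  rw [hf]
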